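-- pv_equiv track=rewrite | github.com/hyundoria/BOJ | 백준/Gold/24429. 알고리즘 수업 － 행렬 경로 문제 6/알고리즘 수업 － 행렬 경로 문제 6.py | sub_path
-- ===== SOURCE A (Python) =====
-- def sub_path(arr, sx, sy, ex, ey):
--
--     dx = ex - sx + 1
--     dy = ey - sy + 1
--
--     dp = [[0] * (dy+1) for _ in range(dx+1)]
--
--     for i in range(1, dx+1):
--         for j in range(1, dy+1):
--             dp[i][j] = arr[sx+i-2][sy+j-2] + max(dp[i-1][j], dp[i][j-1])
--
--     return dp[dx][dy]
-- ===== SOURCE B (Python) =====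
-- def sub_path(arr, sx, sy, ex, ey):
--     # Top-down memoized recursion over the path structure: f(i,j) is the best
--     # monotone-path sum ending at subgrid cell (i,j), cached in a dict.
--     dx = ex - sx + 1
--     dy = ey - sy + 1
--     memo = {}
--
--     def f(i, j):
--         if i == 0 or j == 0:
--             return 0
--         if (i, j) not in memo:
--             memo[(i, j)] = arr[sx + i - 2][sy + j - 2] + max(f(i - 1, j), f(i, j - 1))
--         return memo[(i, j)]
--
--     return f(dx, dy)
-- ===== Notes on version B (the rewrite author's own statement) =====
-- stated objective: alternative
-- what changed: Replaces A's bottom-up row-by-row DP table fill with a top-down memoized recursion f(i,j) over the path structure (dict cache, zero base case at the subgrid border), returning f(dx,dy).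
import Mathlib
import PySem

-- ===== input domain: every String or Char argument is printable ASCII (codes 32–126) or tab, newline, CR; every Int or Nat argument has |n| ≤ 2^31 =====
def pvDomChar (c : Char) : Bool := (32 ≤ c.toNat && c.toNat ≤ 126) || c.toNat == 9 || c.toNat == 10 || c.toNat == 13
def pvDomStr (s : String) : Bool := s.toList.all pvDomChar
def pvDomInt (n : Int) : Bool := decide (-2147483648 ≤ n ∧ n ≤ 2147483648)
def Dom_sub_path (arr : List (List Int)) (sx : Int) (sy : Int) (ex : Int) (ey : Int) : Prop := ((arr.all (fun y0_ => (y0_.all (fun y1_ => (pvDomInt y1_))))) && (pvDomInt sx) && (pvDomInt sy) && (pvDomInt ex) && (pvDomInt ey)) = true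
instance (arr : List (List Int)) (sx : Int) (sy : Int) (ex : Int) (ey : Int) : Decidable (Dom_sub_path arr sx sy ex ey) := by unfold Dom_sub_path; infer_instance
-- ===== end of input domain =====

-- B replaces A's bottom-up row-by-row DP table with a top-down memoized recursion
-- f(i,j) over the path structure. Objective: alternative decomposition, same cost.

-- ===== PORT A =====
-- loop body of A: dp[i][j] = arr[sx+i-2][sy+j-2] + max(dp[i-1][j], dp[i][j-1])
def pvInner (arr : List (List Int)) (sx : Int) (sy : Int) (dp : List (List Int)) (i : Int) (j : Int) : List (List Int) :=
  PySem.List.pySetD dp i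
    (PySem.List.pySetD (PySem.List.pyGetD dp i []) j
      (PySem.List.pyGetD (PySem.List.pyGetD arr (sx + i - 2) []) (sy + j - 2) 0
        + max (PySem.List.pyGetD (PySem.List.pyGetD dp (i - 1) []) j 0)
              (PySem.List.pyGetD (PySem.List.pyGetD dp i []) (j - 1) 0)))

def sub_path (arr : List (List Int)) (sx : Int) (sy : Int) (ex : Int) (ey : Int) : Int :=
  let dx := ex - sx + 1
  let dy := ey - sy + 1
  let dp := (PySem.List.pyRange 1 (dx + 1) 1).foldl
    (fun dp i => (PySem.List.pyRange 1 (dy + 1) 1).foldl (fun dp j => pvInner arr sx sy dp i j) dp)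
    (List.replicate (dx + 1).toNat (List.replicate (dy + 1).toNat 0))
  PySem.List.pyGetD (PySem.List.pyGetD dp dx []) dy 0

-- ===== PORT B =====
-- Source B's recursion f(i,j): base 0 when i == 0 or j == 0, else
-- arr[sx+i-2][sy+j-2] + max(f(i-1,j), f(i,j-1)); the dict memo in Source B is pure
-- caching of this same recursion, so the port is the recursion itself, on Nat
-- arguments (inside Pre_ both dimensions are nonnegative, so toNat is exact).
def pvF (arr : List (List Int)) (sx : Int) (sy : Int) : Nat → Nat → Int
  | 0, _ => 0
  | _ + 1, 0 => 0
  | i + 1, j + 1 =>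
    PySem.List.pyGetD (PySem.List.pyGetD arr (sx + ((i : Int) + 1) - 2) []) (sy + ((j : Int) + 1) - 2) 0
      + max (pvF arr sx sy i (j + 1)) (pvF arr sx sy (i + 1) j)

def sub_path_alt (arr : List (List Int)) (sx : Int) (sy : Int) (ex : Int) (ey : Int) : Int :=
  let dx := ex - sx + 1
  let dy := ey - sy + 1
  pvF arr sx sy dx.toNat dy.toNat

-- ===== PRECONDITION & SPEC =====
-- Pre_ = exactly the inputs where Python A returns (no IndexError): both path dimensions
-- nonnegative and, when both are positive, every row index sx-1..ex-1 and every column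
-- index sy-1..ey-1 the loops touch is a valid Python index (negative indices that Python
-- resolves from the end stay inside Pre_: both versions read the same cells there).
def Pre_sub_path (arr : List (List Int)) (sx : Int) (sy : Int) (ex : Int) (ey : Int) : Prop :=
  (decide (0 ≤ ex - sx + 1) && decide (0 ≤ ey - sy + 1) &&
    (decide (ex - sx + 1 = 0) || decide (ey - sy + 1 = 0) ||
      (decide (-(arr.length : Int) ≤ sx - 1) && decide (ex - 1 < (arr.length : Int)) &&
        (PySem.List.pyRange (sx - 1) ex 1).all (fun r =>
          decide (-((PySem.List.pyGetD arr r []).length : Int) ≤ sy - 1) &&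
          decide (ey - 1 < ((PySem.List.pyGetD arr r []).length : Int)))))) = true
instance (arr : List (List Int)) (sx : Int) (sy : Int) (ex : Int) (ey : Int) : Decidable (Pre_sub_path arr sx sy ex ey) := by unfold Pre_sub_path; infer_instance

def pvWitness_sub_path : List (List Int) × Int × Int × Int × Int := ([[1, 2], [3, 4]], 1, 1, 2, 2)

def Spec_sub_path (arr : List (List Int)) (sx : Int) (sy : Int) (ex : Int) (ey : Int) (out : Int) : Prop := out = sub_path_alt arr sx sy ex ey
instance (arr : List (List Int)) (sx : Int) (sy : Int) (ex : Int) (ey : Int) (out : Int) : Decidable (Spec_sub_path arr sx sy ex ey out) := by unfold Spec_sub_path; infer_instance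

-- ===== CLAIM (what is proved, stated in full; the proofs are below) =====
def Claim_equal_sub_path : Prop := ∀ (arr : List (List Int)) (sx : Int) (sy : Int) (ex : Int) (ey : Int), Dom_sub_path arr sx sy ex ey → Pre_sub_path arr sx sy ex ey → Spec_sub_path arr sx sy ex ey (sub_path arr sx sy ex ey)


-- ===== LEMMAS AND PROOFS =====

lemma pvF_zero_right (arr : List (List Int)) (sx sy : Int) (i : Nat) :
    pvF arr sx sy i 0 = 0 := by cases i <;> simp [pvF]

lemma pvF_zero_left (arr : List (List Int)) (sx sy : Int) (j : Nat) :
    pvF arr sx sy 0 j = 0 := by simp [pvF]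

-- the inner (row) loop of A, characterised against pvF
lemma pv_inner_fold (arr : List (List Int)) (sx sy : Int) (m i : Nat) (hi : 1 ≤ i)
    (dp : List (List Int)) (hlen : i < dp.length)
    (hrow : PySem.List.pyGetD dp (i : Int) [] = List.replicate (m + 1) 0)
    (hprev : ∀ j : Nat, j ≤ m →
      PySem.List.pyGetD (PySem.List.pyGetD dp ((i : Int) - 1) []) (j : Int) 0 = pvF arr sx sy (i - 1) j) :
    ∀ s : Nat, s ≤ m →
      (((PySem.List.pyRange 1 ((s : Int) + 1) 1).foldl
          (fun d j => pvInner arr sx sy d (i : Int) j) dp).length = dp.length) ∧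
      (∀ k : Nat, k ≠ i →
        PySem.List.pyGetD ((PySem.List.pyRange 1 ((s : Int) + 1) 1).foldl
          (fun d j => pvInner arr sx sy d (i : Int) j) dp) (k : Int) [] = PySem.List.pyGetD dp (k : Int) []) ∧
      ((PySem.List.pyGetD ((PySem.List.pyRange 1 ((s : Int) + 1) 1).foldl
          (fun d j => pvInner arr sx sy d (i : Int) j) dp) (i : Int) []).length = m + 1) ∧
      (∀ j : Nat, j ≤ m →
        PySem.List.pyGetD (PySem.List.pyGetD ((PySem.List.pyRange 1 ((s : Int) + 1) 1).foldl
          (fun d j => pvInner arr sx sy d (i : Int) j) dp) (i : Int) []) (j : Int) 0 =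
        if 1 ≤ j ∧ j ≤ s then pvF arr sx sy i j else 0) := by
  intro s
  induction s with
  | zero =>
    intro _
    rw [show ((0 : Nat) : Int) + 1 = 1 by simp, PySem.List.pyRange_one_eq_nil le_rfl]
    refine ⟨rfl, fun _ _ => rfl, ?_, ?_⟩
    · simp only [List.foldl_nil]; rw [hrow]; simp
    · intro j hj
      simp only [List.foldl_nil]
      rw [hrow, if_neg (by omega)]
      simp [PySem.List.pyGetD_natCast, List.getD_eq_getElem?_getD, List.getElem?_replicate]
      split <;> rfl
  | succ s ih =>
    intro hs1
    have hs : s ≤ m := by omega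
    obtain ⟨L, K, RL, RV⟩ := ih hs
    have hrange : PySem.List.pyRange 1 (((s + 1 : Nat) : Int) + 1) 1
        = PySem.List.pyRange 1 ((s : Int) + 1) 1 ++ [(s : Int) + 1] := by
      rw [show (((s + 1 : Nat) : Int) + 1) = ((s : Int) + 1) + 1 by push_cast; ring]
      exact PySem.List.pyRange_one_succ_right (by omega)
    rw [hrange, List.foldl_append, List.foldl_cons, List.foldl_nil]
    set dp' := (PySem.List.pyRange 1 ((s : Int) + 1) 1).foldl
      (fun d j => pvInner arr sx sy d (i : Int) j) dp with hdp'
    set r' := PySem.List.pyGetD dp' (i : Int) [] with hr'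
    have hup : PySem.List.pyGetD (PySem.List.pyGetD dp' ((i : Int) - 1) []) ((s : Int) + 1) 0
        = pvF arr sx sy (i - 1) (s + 1) := by
      have hcast : ((i : Int) - 1) = ((i - 1 : Nat) : Int) := by omega
      have hk := K (i - 1) (by omega)
      rw [hcast, hk, ← hcast]
      have := hprev (s + 1) hs1
      rw [show (((s + 1 : Nat) : Int)) = (s : Int) + 1 by push_cast; ring] at this
      exact this
    have hleft : PySem.List.pyGetD r' (((s : Int) + 1) - 1) 0 = pvF arr sx sy i s := by
      rw [show ((s : Int) + 1) - 1 = (s : Int) by ring]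
      rw [RV s hs]
      by_cases h1 : 1 ≤ s
      · rw [if_pos ⟨h1, le_rfl⟩]
      · have : s = 0 := by omega
        subst this
        rw [if_neg (by omega), pvF_zero_right]
    have hval : PySem.List.pyGetD (PySem.List.pyGetD arr (sx + (i : Int) - 2) []) (sy + ((s : Int) + 1) - 2) 0
        + max (PySem.List.pyGetD (PySem.List.pyGetD dp' ((i : Int) - 1) []) ((s : Int) + 1) 0)
              (PySem.List.pyGetD r' (((s : Int) + 1) - 1) 0)
        = pvF arr sx sy i (s + 1) := by
      rw [hup, hleft]
      obtain ⟨i', rfl⟩ : ∃ i', i = i' + 1 := ⟨i - 1, by omega⟩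
      simp only [pvF, Nat.add_sub_cancel]
      have h1 : sx + ((i' + 1 : Nat) : Int) - 2 = sx + ((i' : Int) + 1) - 2 := by push_cast; ring
      rw [h1]
    simp only [pvInner, ← hr']
    rw [hval]
    rw [show ((s : Int) + 1) = ((s + 1 : Nat) : Int) by push_cast; ring]
    rw [PySem.List.pySetD_natCast, PySem.List.pySetD_natCast]
    refine ⟨?_, ?_, ?_, ?_⟩
    · rw [List.length_set]; exact L
    · intro k hk
      rw [PySem.List.pyGetD_natCast, List.getD_eq_getElem?_getD,
        List.getElem?_set_ne (by omega), ← List.getD_eq_getElem?_getD,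
        ← PySem.List.pyGetD_natCast]
      exact K k hk
    · rw [PySem.List.pyGetD_natCast, List.getD_eq_getElem?_getD,
        List.getElem?_set_self (by omega : i < dp'.length), Option.getD_some,
        List.length_set]
      exact RL
    · intro j hj
      rw [PySem.List.pyGetD_natCast, PySem.List.pyGetD_natCast,
        List.getD_eq_getElem?_getD, List.getD_eq_getElem?_getD,
        List.getElem?_set_self (by omega : i < dp'.length), Option.getD_some]
      by_cases hjs : j = s + 1
      · subst hjs
        rw [List.getElem?_set_self (by omega : s + 1 < r'.length), Option.getD_some,
          if_pos ⟨by omega, le_rfl⟩]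
      · rw [List.getElem?_set_ne (by omega), ← List.getD_eq_getElem?_getD,
          ← PySem.List.pyGetD_natCast, RV j hj]
        exact if_congr (by omega) rfl rfl

-- the outer loop of A, characterised against pvF
lemma pv_outer_fold (arr : List (List Int)) (sx sy : Int) (n m : Nat) :
    ∀ t : Nat, t ≤ n →
      (((PySem.List.pyRange 1 ((t : Int) + 1) 1).foldl
          (fun dp i => (PySem.List.pyRange 1 ((m : Int) + 1) 1).foldl
            (fun dp j => pvInner arr sx sy dp i j) dp)
          (List.replicate (n + 1) (List.replicate (m + 1) 0))).length = n + 1) ∧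
      (∀ i : Nat, t < i → i ≤ n →
        PySem.List.pyGetD ((PySem.List.pyRange 1 ((t : Int) + 1) 1).foldl
          (fun dp i => (PySem.List.pyRange 1 ((m : Int) + 1) 1).foldl
            (fun dp j => pvInner arr sx sy dp i j) dp)
          (List.replicate (n + 1) (List.replicate (m + 1) 0))) (i : Int) [] = List.replicate (m + 1) 0) ∧
      (∀ i : Nat, i ≤ t → ∀ j : Nat, j ≤ m →
        PySem.List.pyGetD (PySem.List.pyGetD ((PySem.List.pyRange 1 ((t : Int) + 1) 1).foldl
          (fun dp i => (PySem.List.pyRange 1 ((m : Int) + 1) 1).foldl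
            (fun dp j => pvInner arr sx sy dp i j) dp)
          (List.replicate (n + 1) (List.replicate (m + 1) 0))) (i : Int) []) (j : Int) 0 =
        pvF arr sx sy i j) := by
  intro t
  induction t with
  | zero =>
    intro _
    rw [show ((0 : Nat) : Int) + 1 = 1 by simp, PySem.List.pyRange_one_eq_nil le_rfl]
    refine ⟨by simp, ?_, ?_⟩
    · intro i _ hin
      simp only [List.foldl_nil]
      rw [PySem.List.pyGetD_natCast, List.getD_eq_getElem?_getD, List.getElem?_replicate,
        if_pos (by omega : i < n + 1), Option.getD_some]
    · intro i hi j hj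
      have hi0 : i = 0 := by omega
      subst hi0
      simp only [List.foldl_nil]
      rw [pvF_zero_left, PySem.List.pyGetD_natCast, PySem.List.pyGetD_natCast,
        List.getD_eq_getElem?_getD, List.getD_eq_getElem?_getD,
        List.getElem?_replicate, if_pos (by omega : (0 : Nat) < n + 1), Option.getD_some,
        List.getElem?_replicate]
      split <;> rfl
  | succ t ih =>
    intro ht1
    have hIH := ih (by omega)
    set dpT := (PySem.List.pyRange 1 ((t : Int) + 1) 1).foldl
      (fun dp i => (PySem.List.pyRange 1 ((m : Int) + 1) 1).foldl
        (fun dp j => pvInner arr sx sy dp i j) dp)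
      (List.replicate (n + 1) (List.replicate (m + 1) 0)) with hdpT
    obtain ⟨L, Z, V⟩ := hIH
    have hinner := pv_inner_fold arr sx sy m (t + 1) (by omega) dpT
      (by rw [L]; omega)
      (Z (t + 1) (by omega) (by omega))
      (by
        intro j hj
        have hcast : ((t + 1 : Nat) : Int) - 1 = ((t : Nat) : Int) := by push_cast; ring
        rw [hcast]
        simp only [Nat.add_sub_cancel]
        exact V t le_rfl j hj)
      m le_rfl
    obtain ⟨L', K', RL', RV'⟩ := hinner
    have hc : ((t + 1 : Nat) : Int) = (t : Int) + 1 := by push_cast; ring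
    have hrange : PySem.List.pyRange 1 (((t + 1 : Nat) : Int) + 1) 1
        = PySem.List.pyRange 1 ((t : Int) + 1) 1 ++ [(t : Int) + 1] := by
      rw [hc]
      exact PySem.List.pyRange_one_succ_right (by omega)
    rw [hrange, List.foldl_append, List.foldl_cons, List.foldl_nil, ← hdpT, ← hc]
    refine ⟨?_, ?_, ?_⟩
    · rw [L']; exact L
    · intro i hi hin
      rw [K' i (by omega)]
      exact Z i (by omega) hin
    · intro i hit j hj
      by_cases hie : i = t + 1
      · subst hie
        rw [RV' j hj]
        by_cases h1 : 1 ≤ j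
        · rw [if_pos ⟨h1, hj⟩]
        · have : j = 0 := by omega
          subst this
          rw [if_neg (by omega), pvF_zero_right]
      · rw [K' i hie]
        exact V i (by omega) j hj

-- ===== VERDICT (by name: the statement is the Claim_ definition above) =====
theorem sub_path_spec : Claim_equal_sub_path := by
  intro arr sx sy ex ey _ hPre
  unfold Pre_sub_path at hPre
  simp only [Bool.and_eq_true, decide_eq_true_eq] at hPre
  obtain ⟨⟨hdx, hdy⟩, -⟩ := hPre
  show sub_path arr sx sy ex ey = sub_path_alt arr sx sy ex ey
  have hx : ex - sx + 1 = ((ex - sx + 1).toNat : Int) := (Int.toNat_of_nonneg hdx).symm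
  have hy : ey - sy + 1 = ((ey - sy + 1).toNat : Int) := (Int.toNat_of_nonneg hdy).symm
  set n := (ex - sx + 1).toNat with hn
  set m := (ey - sy + 1).toNat with hm
  have ha : sub_path arr sx sy ex ey = pvF arr sx sy n m := by
    have h := (pv_outer_fold arr sx sy n m n le_rfl).2.2 n le_rfl m le_rfl
    unfold sub_path
    rw [hx, hy]
    simpa using h
  rw [ha]
  rfl
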